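-- pv_equiv track=rewrite | github.com/Stallion77RepoOfficial/binfreak | binfreak/binfreak/analysis/basic_block_analyzer.py | _calculate_block_complexity
-- ===== SOURCE A (Python) =====
-- from typing import Dict, Any, List
--
-- def _calculate_block_complexity(instructions: List[Dict[str, Any]]) -> int:
--     """Calculate basic block complexity score"""
--     complexity = len(instructions)
--
--     for instr in instructions:
--         instr_type = instr.get('type', '')
--
--         # Add complexity for different instruction types
--         if instr_type == 'control_flow':
--             complexity += 3
--         elif instr_type == 'system':
--             complexity += 2
--         elif instr_type in ['arithmetic', 'logical']:
--             complexity += 1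
--
--     return complexity
-- ===== SOURCE B (Python) =====
-- from typing import Dict, Any, List
--
-- WEIGHTS = (('control_flow', 3), ('system', 2), ('arithmetic', 1), ('logical', 1))
--
-- def _calculate_block_complexity(instructions: List[Dict[str, Any]]) -> int:
--     """Complexity = len + per-category weighted counts: loop over the fixed
--     weight table, scanning the extracted type list once per category."""
--     types = [instr.get('type', '') for instr in instructions]
--     score = len(types)
--     for t, w in WEIGHTS:
--         score += w * types.count(t)
--     return score
-- ===== Notes on version B (the rewrite author's own statement) =====
-- stated objective: alternative
-- what changed: Inverts the loop structure: instead of a single pass over instructions with a per-instruction if/elif branch, B extracts the type list and then iterates over a fixed (category, weight) table, counting each category's occurrences with a separate scan; unknown types contribute nothing because they are never counted.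
import Mathlib
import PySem

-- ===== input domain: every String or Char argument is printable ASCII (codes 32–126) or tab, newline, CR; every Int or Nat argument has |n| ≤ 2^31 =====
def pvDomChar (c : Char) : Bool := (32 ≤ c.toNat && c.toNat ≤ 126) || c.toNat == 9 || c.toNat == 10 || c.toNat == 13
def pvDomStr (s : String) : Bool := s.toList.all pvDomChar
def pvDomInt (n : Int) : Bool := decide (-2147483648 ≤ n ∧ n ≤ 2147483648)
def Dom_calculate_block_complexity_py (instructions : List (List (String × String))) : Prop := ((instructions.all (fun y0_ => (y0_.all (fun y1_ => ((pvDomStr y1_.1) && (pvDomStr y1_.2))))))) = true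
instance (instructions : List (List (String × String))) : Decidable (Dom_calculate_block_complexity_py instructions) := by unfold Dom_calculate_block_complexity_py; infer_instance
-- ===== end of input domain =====

-- B changes the loop structure (outer loop over a fixed weight table, a counting scan per category); same result, same O(n) cost.

-- ===== PORT A =====
def calculate_block_complexity_py (instructions : List (List (String × String))) : Int :=
  instructions.foldl (fun complexity instr =>
    let instr_type := (instr.lookup "type").getD ""
    if instr_type == "control_flow" then complexity + 3
    else if instr_type == "system" then complexity + 2
    else if instr_type == "arithmetic" || instr_type == "logical" then complexity + 1
    else complexity) (instructions.length : Int)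

-- ===== PORT B =====
def pvWeights : List (String × Int) :=
  [("control_flow", 3), ("system", 2), ("arithmetic", 1), ("logical", 1)]

def calculate_block_complexity_py_alt (instructions : List (List (String × String))) : Int :=
  let types := instructions.map (fun instr => (instr.lookup "type").getD "")
  pvWeights.foldl (fun score tw => score + tw.2 * (types.count tw.1 : Int)) (types.length : Int)

-- ===== PRECONDITION & SPEC =====
def Spec_calculate_block_complexity_py (instructions : List (List (String × String))) (out : Int) : Prop := out = calculate_block_complexity_py_alt instructions
instance (instructions : List (List (String × String))) (out : Int) : Decidable (Spec_calculate_block_complexity_py instructions out) := by unfold Spec_calculate_block_complexity_py; infer_instance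

-- ===== CLAIM (what is proved, stated in full; the proofs are below) =====
def Claim_equal_calculate_block_complexity_py : Prop := ∀ (instructions : List (List (String × String))), Dom_calculate_block_complexity_py instructions → Spec_calculate_block_complexity_py instructions (calculate_block_complexity_py instructions)

-- ===== LEMMAS AND PROOFS =====
lemma foldl_step_eq (l : List (List (String × String))) (a : Int) :
    l.foldl (fun complexity instr =>
      let instr_type := (instr.lookup "type").getD ""
      if instr_type == "control_flow" then complexity + 3
      else if instr_type == "system" then complexity + 2
      else if instr_type == "arithmetic" || instr_type == "logical" then complexity + 1
      else complexity) a
    = a + 3 * ((l.map (fun instr => (instr.lookup "type").getD "")).count "control_flow" : Int)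
        + 2 * ((l.map (fun instr => (instr.lookup "type").getD "")).count "system" : Int)
        + ((l.map (fun instr => (instr.lookup "type").getD "")).count "arithmetic" : Int)
        + ((l.map (fun instr => (instr.lookup "type").getD "")).count "logical" : Int) := by
  induction l generalizing a with
  | nil => simp
  | cons x xs ih =>
    simp only [List.foldl_cons, List.map_cons, List.count_cons, ih]
    by_cases h1 : (x.lookup "type").getD "" = "control_flow"
    · simp [h1]; ring
    by_cases h2 : (x.lookup "type").getD "" = "system"
    · simp [h2]; ring
    by_cases h3 : (x.lookup "type").getD "" = "arithmetic"
    · simp [h3]; ring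
    by_cases h4 : (x.lookup "type").getD "" = "logical"
    · simp [h4]; ring
    · simp [h1, h2, h3, h4]

-- ===== VERDICT (by name: the statement is the Claim_ definition above) =====
theorem calculate_block_complexity_py_spec : Claim_equal_calculate_block_complexity_py := by
  intro instructions _
  unfold Spec_calculate_block_complexity_py calculate_block_complexity_py
    calculate_block_complexity_py_alt pvWeights
  simp only [List.foldl_cons, List.foldl_nil, List.length_map, foldl_step_eq]
  ring
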